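-- pv_equiv track=rewrite | github.com/Qouou/Customize-2DString- | mysite/weather/codes/compare_all_data.py | addLine
-- ===== SOURCE A (Python) =====
-- def changePattern(string):
--     i = 0
--     newStr = ''
--     while i < len(string)-1:
--         if string[i] == '#':
--             newStr += '#'
--         elif string[i+1] == 'b':
--             newStr += string[i]
--         elif string[i+1] == 'e':
--             newStr += string[i].lower()
--         i += 1
--     return newStr
--
-- def addLine(string):
--     stringAfterChange = changePattern(string)
--     i = 0
--     newStr = ''
--     tmpBegin = ''
--     tmpEnd = ''
--     while i < len(stringAfterChange)-1:
--         if stringAfterChange[i].islower():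
--             tmpEnd += stringAfterChange[i]
--         elif stringAfterChange[i] == '#':
--             i += 1
--             continue
--         else:
--             tmpBegin += stringAfterChange[i]
--         newStr += '#' + tmpBegin + '#' + tmpEnd
--         tmpBegin = ''
--         tmpEnd = ''
--         i += 1
--     return newStr
-- ===== SOURCE B (Python) =====
-- def addLine(string):
--     # single fused pass: produce each transformed char and emit the previous one's segment
--     segs = []
--     pending = None
--     for i in range(len(string) - 1):
--         c = string[i]
--         if c == '#':
--             t = '#'
--         elif string[i + 1] == 'b':
--             t = c
--         elif string[i + 1] == 'e':
--             t = c.lower()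
--         else:
--             continue
--         if pending is not None:
--             if pending == '#':
--                 pass
--             elif pending.islower():
--                 segs.append('##' + pending)
--             else:
--                 segs.append('#' + pending + '#')
--         pending = t
--     return ''.join(segs)
-- ===== Notes on version B (the rewrite author's own statement) =====
-- stated objective: faster
-- what changed: Fused the two passes (build intermediate transformed string, then re-scan it emitting bracketed segments) into one forward loop with a one-char pending buffer that emits each produced char's segment when the next one appears, collecting segments in a list joined once instead of repeated string concatenation.
import Mathlib
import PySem

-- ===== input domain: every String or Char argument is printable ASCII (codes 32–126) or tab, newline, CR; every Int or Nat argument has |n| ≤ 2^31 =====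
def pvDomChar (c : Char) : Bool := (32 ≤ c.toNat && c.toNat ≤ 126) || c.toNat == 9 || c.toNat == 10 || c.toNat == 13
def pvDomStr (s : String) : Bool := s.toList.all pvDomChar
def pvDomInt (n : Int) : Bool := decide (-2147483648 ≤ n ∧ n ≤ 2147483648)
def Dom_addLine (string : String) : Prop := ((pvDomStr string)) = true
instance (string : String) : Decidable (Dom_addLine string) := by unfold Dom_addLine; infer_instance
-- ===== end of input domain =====

-- B fuses A's two passes into one loop with a one-char pending buffer; return values proved equal.

-- ===== PORT A =====
-- while i < len(string)-1 over characters: structural recursion on (current, next, rest)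
def changePatternAux : List Char → List Char
  | c :: d :: rest =>
      (if c = '#' then ['#']
       else if d = 'b' then [c]
       else if d = 'e' then [PySem.Chars.lowerChar c]
       else []) ++ changePatternAux (d :: rest)
  | _ => []

-- second while loop of addLine over the transformed string (tmpBegin/tmpEnd are reset each
-- iteration, so each iteration appends '#'+tmpBegin+'#'+tmpEnd with one of them the char)
def addLineLoopA : List Char → List Char
  | c :: d :: rest =>
      (if PySem.Chars.islower c then '#' :: '#' :: [c]
       else if c = '#' then []
       else '#' :: c :: ['#']) ++ addLineLoopA (d :: rest)
  | _ => []

def addLine (string : String) : String :=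
  String.ofList (addLineLoopA (changePatternAux string.toList))

-- ===== PORT B =====
-- segment emitted for a pending char
def segB (p : Char) : List Char :=
  if p = '#' then []
  else if PySem.Chars.islower p then '#' :: '#' :: [p]
  else '#' :: p :: ['#']

-- one fused pass: compute each transformed char t; emit the previous pending char's segment
def bAux : List Char → Option Char → List Char
  | c :: d :: rest, pending =>
      let t? : Option Char :=
        if c = '#' then some '#'
        else if d = 'b' then some c
        else if d = 'e' then some (PySem.Chars.lowerChar c)
        else none
      match t? with
      | none => bAux (d :: rest) pending
      | some t =>
          (match pending with
           | some p => segB p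
           | none => []) ++ bAux (d :: rest) (some t)
  | _, _ => []

def addLine_alt (string : String) : String :=
  String.ofList (bAux string.toList none)

-- ===== PRECONDITION & SPEC =====
def Spec_addLine (string : String) (out : String) : Prop := out = addLine_alt string
instance (string : String) (out : String) : Decidable (Spec_addLine string out) := by unfold Spec_addLine; infer_instance

-- ===== CLAIM (what is proved, stated in full; the proofs are below) =====
def Claim_equal_addLine : Prop := ∀ (string : String), Dom_addLine string → Spec_addLine string (addLine string)

-- ===== LEMMAS AND PROOFS =====

-- A's loop body agrees with segB ('#' is not islower, so the branch order does not matter)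
lemma addLineLoopA_eq_seg : ∀ t : List Char,
    addLineLoopA t = (t.dropLast.map segB).flatten
  | [] => rfl
  | [c] => rfl
  | c :: d :: rest => by
      rw [addLineLoopA, show (c :: d :: rest).dropLast = c :: (d :: rest).dropLast from rfl,
        List.map_cons, List.flatten_cons, addLineLoopA_eq_seg (d :: rest)]
      congr 1
      by_cases h : c = '#'
      · subst h; rfl
      · simp [segB, h]

lemma bAux_eq : ∀ (l : List Char) (pending : Option Char),
    bAux l pending = (((pending.toList ++ changePatternAux l).dropLast).map segB).flatten
  | [], pending => by cases pending <;> rfl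
  | [c], pending => by cases pending <;> rfl
  | c :: d :: rest, pending => by
      have hb : bAux (c :: d :: rest) pending =
          (if c = '#' then (pending.elim [] segB) ++ bAux (d :: rest) (some '#')
           else if d = 'b' then (pending.elim [] segB) ++ bAux (d :: rest) (some c)
           else if d = 'e' then
             (pending.elim [] segB) ++ bAux (d :: rest) (some (PySem.Chars.lowerChar c))
           else bAux (d :: rest) pending) := by
        cases pending <;> by_cases h1 : c = '#' <;> by_cases h2 : d = 'b' <;>
          by_cases h3 : d = 'e' <;> simp [bAux, h1, h2, h3]
      have hc : changePatternAux (c :: d :: rest) =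
          (if c = '#' then ['#'] else if d = 'b' then [c]
           else if d = 'e' then [PySem.Chars.lowerChar c] else [])
            ++ changePatternAux (d :: rest) := rfl
      rw [hb, hc]
      split_ifs with h1 h2 h3 <;>
        [rw [bAux_eq (d :: rest) (some '#')];
         rw [bAux_eq (d :: rest) (some c)];
         rw [bAux_eq (d :: rest) (some (PySem.Chars.lowerChar c))];
         rw [bAux_eq (d :: rest) pending]] <;>
        cases pending <;>
        simp [List.dropLast_cons_of_ne_nil]

-- ===== VERDICT (by name: the statement is the Claim_ definition above) =====
theorem addLine_spec : Claim_equal_addLine := by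
  intro s _
  show addLine s = addLine_alt s
  rw [addLine, addLine_alt, addLineLoopA_eq_seg, bAux_eq]
  rfl
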